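-- pv_equiv track=rewrite | github.com/mnestis/advent2017 | 09/part1.py | score_stream
-- ===== SOURCE A (Python) =====
-- def remove_garbage(data_stream):
--
--     in_garbage = False
--     bang_count = 0
--
--     output_stream = ""
--     for char in data_stream:
--         if not in_garbage:
--             if char != "<":
--                 output_stream += char
--             else:
--                 in_garbage = True
--         else:
--             if char == "!":
--                 bang_count += 1
--             else:
--                 if bang_count % 2 == 0 and char == ">":
--                     in_garbage = False
--                 bang_count = 0
--     return output_stream
--
-- def score_stream(data_stream):
--     stream = remove_garbage(data_stream)
--     score = 0
--
--     assert stream.count("{") == stream.count("}")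
--
--     depth = 0
--     for char in stream:
--         if char == "{":
--             depth += 1
--         elif char == "}":
--             score += depth
--             depth -= 1
--     return score
-- ===== SOURCE B (Python) =====
-- def score_stream(data_stream):
--     in_garbage = False
--     bang_count = 0
--     depth = 0
--     score = 0
--     opens = 0
--     closes = 0
--     for char in data_stream:
--         if in_garbage:
--             if char == "!":
--                 bang_count += 1
--             else:
--                 if bang_count % 2 == 0 and char == ">":
--                     in_garbage = False
--                 bang_count = 0
--         elif char == "<":
--             in_garbage = True
--         elif char == "{":
--             depth += 1
--             opens += 1
--         elif char == "}":
--             score += depth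
--             depth -= 1
--             closes += 1
--     assert opens == closes
--     return score
-- ===== Notes on version B (the rewrite author's own statement) =====
-- stated objective: faster
-- what changed: Single pass over the stream with a garbage-state machine and running depth/score counters, instead of building an intermediate garbage-free string and scoring it in a second pass with two extra .count passes.
import Mathlib
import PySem

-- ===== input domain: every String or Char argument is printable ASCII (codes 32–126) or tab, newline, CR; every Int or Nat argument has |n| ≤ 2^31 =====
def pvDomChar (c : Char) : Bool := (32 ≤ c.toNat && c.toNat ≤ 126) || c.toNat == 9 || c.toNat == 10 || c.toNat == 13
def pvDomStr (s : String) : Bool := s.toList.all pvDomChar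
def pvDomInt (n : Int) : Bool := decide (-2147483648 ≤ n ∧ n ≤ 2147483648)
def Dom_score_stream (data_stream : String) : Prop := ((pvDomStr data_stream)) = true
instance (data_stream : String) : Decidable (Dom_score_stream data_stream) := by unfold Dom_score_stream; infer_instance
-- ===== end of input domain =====

-- B scores the stream in a single pass with a garbage-state machine (no intermediate string): simpler.
-- Pre_ excludes inputs on which A's assert fails (unbalanced braces outside garbage), where both A and B raise AssertionError.


-- ===== PORT A =====
-- the 'for char in data_stream' loop of remove_garbage, state (in_garbage, bang_count, output_stream)
def rgLoop : List Char → Bool → Int → List Char → List Char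
  | [], _, _, out => out
  | ch :: cs, ig, bc, out =>
    if ig = false then
      if ch ≠ '<' then rgLoop cs ig bc (out ++ [ch])
      else rgLoop cs true bc out
    else
      if ch = '!' then rgLoop cs ig (bc + 1) out
      else rgLoop cs (if bc % 2 = 0 ∧ ch = '>' then false else ig) 0 out

def remove_garbage (data_stream : String) : String :=
  String.ofList (rgLoop data_stream.toList false 0 [])

-- the scoring loop of score_stream, state (depth, score)
def scLoop : List Char → Int → Int → Int
  | [], _, score => score
  | ch :: cs, depth, score =>
    if ch = '{' then scLoop cs (depth + 1) score
    else if ch = '}' then scLoop cs (depth - 1) (score + depth)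
    else scLoop cs depth score

-- the assert is exact on Pre_ (it never fires there; inputs where it raises are outside Pre_)
def score_stream (data_stream : String) : Int :=
  scLoop (remove_garbage data_stream).toList 0 0

-- ===== PORT B =====
-- B's single loop, state (in_garbage, bang_count, depth, score, opens, closes); assert passes on Pre_
def bLoop : List Char → Bool → Int → Int → Int → Int → Int → Int
  | [], _, _, _, score, _, _ => score
  | ch :: cs, ig, bc, depth, score, op, cl =>
    if ig = true then
      if ch = '!' then bLoop cs ig (bc + 1) depth score op cl
      else bLoop cs (if bc % 2 = 0 ∧ ch = '>' then false else ig) 0 depth score op cl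
    else if ch = '<' then bLoop cs true bc depth score op cl
    else if ch = '{' then bLoop cs ig bc (depth + 1) score (op + 1) cl
    else if ch = '}' then bLoop cs ig bc (depth - 1) (score + depth) op (cl + 1)
    else bLoop cs ig bc depth score op cl

def score_stream_alt (data_stream : String) : Int :=
  bLoop data_stream.toList false 0 0 0 0 0

-- ===== PRECONDITION & SPEC =====
-- net count of '{' minus '}' outside garbage (the quantity A's assert checks to be zero)
def pvBal : List Char → Bool → Int → Int
  | [], _, _ => 0
  | ch :: cs, ig, bc =>
    if ig = true then
      if ch = '!' then pvBal cs ig (bc + 1)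
      else pvBal cs (if bc % 2 = 0 ∧ ch = '>' then false else ig) 0
    else if ch = '<' then pvBal cs true bc
    else if ch = '{' then pvBal cs ig bc + 1
    else if ch = '}' then pvBal cs ig bc - 1
    else pvBal cs ig bc

-- Pre_ excludes exactly the inputs where A's assert raises AssertionError (braces outside garbage unbalanced)
def Pre_score_stream (data_stream : String) : Prop :=
  pvBal data_stream.toList false 0 = 0
instance (data_stream : String) : Decidable (Pre_score_stream data_stream) := by
  unfold Pre_score_stream; infer_instance

def pvWitness_score_stream : String := "{{<a!>},{<!!b>}}"

def Spec_score_stream (data_stream : String) (out : Int) : Prop := out = score_stream_alt data_stream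
instance (data_stream : String) (out : Int) : Decidable (Spec_score_stream data_stream out) := by unfold Spec_score_stream; infer_instance

-- ===== CLAIM (what is proved, stated in full; the proofs are below) =====
def Claim_equal_score_stream : Prop := ∀ (data_stream : String), Dom_score_stream data_stream → Pre_score_stream data_stream → Spec_score_stream data_stream (score_stream data_stream)

-- ===== LEMMAS AND PROOFS =====
theorem rgLoop_acc (cs : List Char) : ∀ (ig : Bool) (bc : Int) (out : List Char),
    rgLoop cs ig bc out = out ++ rgLoop cs ig bc [] := by
  induction cs with
  | nil => intro ig bc out; simp [rgLoop]
  | cons ch cs ih =>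
    intro ig bc out
    simp only [rgLoop]
    split_ifs with h1 h2
    · rw [ih, ih _ _ ([] ++ [ch])]; simp
    all_goals rw [ih]

theorem bLoop_eq_scLoop (cs : List Char) : ∀ (ig : Bool) (bc depth score op cl : Int),
    bLoop cs ig bc depth score op cl = scLoop (rgLoop cs ig bc []) depth score := by
  induction cs with
  | nil => intro ig bc depth score op cl; simp [bLoop, rgLoop, scLoop]
  | cons ch cs ih =>
    intro ig bc depth score op cl
    cases ig with
    | true =>
      simp only [bLoop, rgLoop, if_neg (by decide : ¬ (true = false))]
      split_ifs with h1 <;> rw [ih]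
    | false =>
      by_cases hlt : ch = '<'
      · simp [bLoop, rgLoop, hlt, ih]
      · have hacc := rgLoop_acc cs false bc [ch]
        by_cases hop : ch = '{'
        · subst hop
          simp only [bLoop, rgLoop, ih]
          simp [hacc, scLoop]
        · by_cases hcl : ch = '}'
          · subst hcl
            simp only [bLoop, rgLoop, ih]
            simp [hacc, scLoop]
          · simp only [bLoop, rgLoop, ih]
            simp [hlt, hop, hcl, hacc, scLoop]

-- ===== VERDICT (by name: the statement is the Claim_ definition above) =====
theorem score_stream_spec : Claim_equal_score_stream := by
  intro data_stream _ _
  unfold Spec_score_stream score_stream score_stream_alt remove_garbage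
  rw [bLoop_eq_scLoop]
  rw [String.toList_ofList]
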